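-- pv_equiv track=rewrite | github.com/brandonhippe/Advent-of-Code | 2024/2024_23.py | part1
-- ===== SOURCE A (Python) =====
-- from typing import Any, List, Tuple
-- from collections import defaultdict, deque
--
-- def part1(data: List[str]) -> Any:
--     """
--     2024 Day 23 Part 1
--     >>> part1(["kh-tc", "qp-kh", "de-cg", "ka-co", "yn-aq", "qp-ub", "cg-tb", "vc-aq", "tb-ka", "wh-tc", "yn-cg", "kh-ub", "ta-co", "de-co", "tc-td", "tb-wq", "wh-td", "ta-ka", "td-qp", "aq-cg", "wq-ub", "ub-vc", "de-ta", "wq-aq", "wq-vc", "wh-yn", "ka-de", "kh-ta", "co-tc", "wh-qp", "tb-vc", "td-yn"])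
--     7
--     """
--     connections = defaultdict(set)
--     for line in data:
--         a, b = line.split("-")
--         connections[a].add(b)
--         connections[b].add(a)
--
--     total = set()
--     for k, connected in connections.items():
--         if k[0] != 't':
--             continue
--
--         for k1 in connected:
--             for k2 in connections[k1]:
--                 if k2 in connected:
--                     total.add(tuple(sorted([k, k1, k2])))
--
--     return len(total)
-- ===== SOURCE B (Python) =====
-- def part1(data):
--     # edge-centric triangle enumeration: for each edge (a, b), every common
--     # neighbor of a and b closes a triangle; keep it if any corner is a t-node.
--     edges = []
--     adj = {}
--     for line in data:
--         a, b = line.split("-")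
--         edges.append((a, b))
--         adj.setdefault(a, set()).add(b)
--         adj.setdefault(b, set()).add(a)
--
--     triangles = set()
--     for a, b in edges:
--         for w in adj[a] & adj[b]:
--             if a.startswith("t") or b.startswith("t") or w.startswith("t"):
--                 triangles.add(tuple(sorted((a, b, w))))
--     return len(triangles)
-- ===== Notes on version B (the rewrite author's own statement) =====
-- stated objective: alternative
-- what changed: B enumerates triangles edge-centrically: it keeps the input edge list and, for each edge (a,b), closes triangles through the set intersection of a's and b's neighborhoods, keeping a triple if any of its three corners is a t-node, instead of A's node-centric scan over t-keys with a neighbor-of-neighbor membership filter.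
import Mathlib
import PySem

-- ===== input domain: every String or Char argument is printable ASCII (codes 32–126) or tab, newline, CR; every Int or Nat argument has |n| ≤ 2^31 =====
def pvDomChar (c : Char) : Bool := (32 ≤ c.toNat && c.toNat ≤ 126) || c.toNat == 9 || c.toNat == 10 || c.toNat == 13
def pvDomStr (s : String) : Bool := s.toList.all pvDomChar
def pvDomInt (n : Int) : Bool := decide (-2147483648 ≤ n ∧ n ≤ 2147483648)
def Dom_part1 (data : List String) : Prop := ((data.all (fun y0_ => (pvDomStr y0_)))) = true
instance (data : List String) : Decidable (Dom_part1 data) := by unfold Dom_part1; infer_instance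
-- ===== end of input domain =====

-- B replaces A's t-node-centric neighbor-of-neighbor scan by edge-centric triangle
-- enumeration: one pass over the input edge list closing each edge through the
-- intersection of its endpoints' neighbor sets (alternative decomposition, similar cost).


-- ===== PORT A =====
-- A's adjacency building: defaultdict(set); connections[a].add(b) / connections[b].add(a)
-- is Dict.modify with default Set.empty. A line that does not split on "-" into exactly
-- two parts makes Python A raise ValueError (outside Pre_); the port skips it.
def buildStep (d : PySem.Dict String (PySem.Set String)) (line : String) :
    PySem.Dict String (PySem.Set String) :=
  match PySem.Str.split? line "-" with
  | some [a, b] =>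
      (d.modify a PySem.Set.empty (fun s => PySem.Set.add s b)).modify b PySem.Set.empty
        (fun s => PySem.Set.add s a)
  | _ => d

def mkConn (data : List String) : PySem.Dict String (PySem.Set String) :=
  data.foldl buildStep PySem.Dict.empty

-- A's collection loop: for (k, connected) in items with k[0] == 't', for k1 in connected,
-- for k2 in connections[k1], if k2 in connected add tuple(sorted([k, k1, k2])).
-- (k[0] is pyGet? k 0; none — Python's IndexError on the key "" — is outside Pre_.)
def totalA (conns : PySem.Dict String (PySem.Set String)) : PySem.Set (List String) :=
  conns.items.foldl (fun tot kc =>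
    if PySem.Str.pyGet? kc.1 0 ≠ some 't' then tot
    else kc.2.foldl (fun tot2 k1 =>
      (conns.getD k1 PySem.Set.empty).foldl (fun tot3 k2 =>
        if PySem.Set.contains kc.2 k2 then
          PySem.Set.add tot3 (PySem.List.sorted [kc.1, k1, k2] (fun y => y))
        else tot3) tot2) tot) PySem.Set.empty

def part1 (data : List String) : Int :=
  PySem.Set.len (totalA (mkConn data))

-- ===== PORT B =====
-- B's single building pass keeps the edge list AND the adjacency dict
-- (setdefault(x, set()).add(y) mutates the stored set in place = Dict.modify with default ∅).
def buildStepB (st : List (String × String) × PySem.Dict String (PySem.Set String))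
    (line : String) : List (String × String) × PySem.Dict String (PySem.Set String) :=
  match PySem.Str.split? line "-" with
  | some [a, b] =>
      (st.1 ++ [(a, b)],
       (st.2.modify a PySem.Set.empty (fun s => PySem.Set.add s b)).modify b PySem.Set.empty
         (fun s => PySem.Set.add s a))
  | _ => st

-- B's collection loop: for (a, b) in edges, for w in adj[a] & adj[b],
-- if a/b/w startswith "t" add tuple(sorted((a, b, w))).
def totalB (edges : List (String × String)) (adj : PySem.Dict String (PySem.Set String)) :
    PySem.Set (List String) :=
  edges.foldl (fun tri ab =>
    (PySem.Set.inter (adj.getD ab.1 PySem.Set.empty) (adj.getD ab.2 PySem.Set.empty)).foldl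
      (fun tri2 w =>
        if PySem.Str.startswith ab.1 "t" || PySem.Str.startswith ab.2 "t" ||
            PySem.Str.startswith w "t" then
          PySem.Set.add tri2 (PySem.List.sorted [ab.1, ab.2, w] (fun y => y))
        else tri2) tri) PySem.Set.empty

def part1_alt (data : List String) : Int :=
  let st := data.foldl buildStepB ([], PySem.Dict.empty)
  PySem.Set.len (totalB st.1 st.2)

-- ===== PRECONDITION & SPEC =====
-- A line is admitted when it splits on "-" into exactly two nonempty parts; otherwise
-- Python A raises (ValueError unpacking, or IndexError on k[0] for the node name "").
def lineOK (line : String) : Bool :=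
  match PySem.Str.split? line "-" with
  | some [a, b] => a ≠ "" && b ≠ ""
  | _ => false

-- Pre_ excludes exactly the inputs on which Python A raises: a line without exactly one
-- "-", or a line with an empty side (empty node name → IndexError on k[0]).
def Pre_part1 (data : List String) : Prop := ∀ line ∈ data, lineOK line = true
instance (data : List String) : Decidable (Pre_part1 data) := by unfold Pre_part1; infer_instance

def pvWitness_part1 : List String := ["ab-tc", "ta-ab", "ta-tc", "kh-tc"]

def Spec_part1 (data : List String) (out : Int) : Prop := out = part1_alt data
instance (data : List String) (out : Int) : Decidable (Spec_part1 data out) := by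
  unfold Spec_part1; infer_instance

-- ===== CLAIM (what is proved, stated in full; the proofs are below) =====
def Claim_equal_part1 : Prop :=
  ∀ (data : List String), Dom_part1 data → Pre_part1 data → Spec_part1 data (part1 data)

-- ===== LEMMAS AND PROOFS =====

-- generic fold shapes over result sets
theorem mem_foldl_or {β : Type} (g : PySem.Set (List String) → β → PySem.Set (List String))
    (x : List String) (P : β → Prop)
    (hg : ∀ s b, x ∈ g s b ↔ x ∈ s ∨ P b) :
    ∀ (l : List β) (s : PySem.Set (List String)), x ∈ l.foldl g s ↔ x ∈ s ∨ ∃ b ∈ l, P b := by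
  intro l
  induction l with
  | nil => simp
  | cons b t ih => intro s; rw [List.foldl_cons, ih, hg]; simp; tauto

theorem nodup_foldl_pres {β : Type} (g : PySem.Set (List String) → β → PySem.Set (List String))
    (hg : ∀ s b, s.Nodup → (g s b).Nodup) :
    ∀ (l : List β) (s : PySem.Set (List String)), s.Nodup → (l.foldl g s).Nodup := by
  intro l
  induction l with
  | nil => simp
  | cons b t ih => intro s hs; rw [List.foldl_cons]; exact ih _ (hg _ _ hs)

theorem mem_totalA (conns : PySem.Dict String (PySem.Set String)) (x : List String) :
    x ∈ totalA conns ↔ ∃ kc ∈ conns.items, PySem.Str.pyGet? kc.1 0 = some 't' ∧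
      ∃ k1 ∈ kc.2, ∃ k2 ∈ conns.getD k1 PySem.Set.empty, k2 ∈ kc.2 ∧
        x = PySem.List.sorted [kc.1, k1, k2] (fun y => y) := by
  unfold totalA
  rw [mem_foldl_or _ x (fun kc => PySem.Str.pyGet? kc.1 0 = some 't' ∧
      ∃ k1 ∈ kc.2, ∃ k2 ∈ conns.getD k1 PySem.Set.empty, k2 ∈ kc.2 ∧
        x = PySem.List.sorted [kc.1, k1, k2] (fun y => y))]
  · simp
  · intro s kc
    by_cases hk : PySem.Str.pyGet? kc.1 0 = some 't'
    · rw [if_neg (fun h => h hk)]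
      rw [mem_foldl_or _ x (fun k1 => ∃ k2 ∈ conns.getD k1 PySem.Set.empty, k2 ∈ kc.2 ∧
          x = PySem.List.sorted [kc.1, k1, k2] (fun y => y))]
      · tauto
      · intro s2 k1
        rw [mem_foldl_or _ x (fun k2 => k2 ∈ kc.2 ∧
            x = PySem.List.sorted [kc.1, k1, k2] (fun y => y))]
        intro s3 k2
        by_cases hm : PySem.Set.contains kc.2 k2 = true
        · rw [if_pos hm, PySem.Set.mem_add]
          have := (PySem.Set.contains_iff kc.2 k2).1 hm
          tauto
        · rw [if_neg hm]
          have : k2 ∉ kc.2 := fun h => hm ((PySem.Set.contains_iff kc.2 k2).2 h)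
          tauto
    · rw [if_pos hk]; tauto

theorem mem_totalB (edges : List (String × String)) (adj : PySem.Dict String (PySem.Set String))
    (x : List String) :
    x ∈ totalB edges adj ↔ ∃ ab ∈ edges,
      ∃ w, w ∈ adj.getD ab.1 PySem.Set.empty ∧ w ∈ adj.getD ab.2 PySem.Set.empty ∧
        (PySem.Str.startswith ab.1 "t" = true ∨ PySem.Str.startswith ab.2 "t" = true ∨
          PySem.Str.startswith w "t" = true) ∧
        x = PySem.List.sorted [ab.1, ab.2, w] (fun y => y) := by
  unfold totalB
  rw [mem_foldl_or _ x (fun ab => ∃ w, w ∈ adj.getD ab.1 PySem.Set.empty ∧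
      w ∈ adj.getD ab.2 PySem.Set.empty ∧
      (PySem.Str.startswith ab.1 "t" = true ∨ PySem.Str.startswith ab.2 "t" = true ∨
        PySem.Str.startswith w "t" = true) ∧
      x = PySem.List.sorted [ab.1, ab.2, w] (fun y => y))]
  · simp
  · intro s ab
    rw [mem_foldl_or _ x (fun w =>
        (PySem.Str.startswith ab.1 "t" = true ∨ PySem.Str.startswith ab.2 "t" = true ∨
          PySem.Str.startswith w "t" = true) ∧
        x = PySem.List.sorted [ab.1, ab.2, w] (fun y => y))]
    · constructor
      · rintro (hx | ⟨w, hw, hcond, hxeq⟩)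
        · exact Or.inl hx
        · have := (PySem.Set.mem_inter _ _ w).1 hw
          exact Or.inr ⟨w, this.1, this.2, hcond, hxeq⟩
      · rintro (hx | ⟨w, hw1, hw2, hcond, hxeq⟩)
        · exact Or.inl hx
        · exact Or.inr ⟨w, (PySem.Set.mem_inter _ _ w).2 ⟨hw1, hw2⟩, hcond, hxeq⟩
    · intro s3 w
      by_cases hc : (PySem.Str.startswith ab.1 "t" || PySem.Str.startswith ab.2 "t" ||
          PySem.Str.startswith w "t") = true
      · rw [if_pos hc, PySem.Set.mem_add]
        simp only [Bool.or_eq_true] at hc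
        tauto
      · rw [if_neg hc]
        simp only [Bool.or_eq_true] at hc
        tauto

theorem nodup_totalA (conns : PySem.Dict String (PySem.Set String)) : (totalA conns).Nodup := by
  unfold totalA
  apply nodup_foldl_pres
  · intro s kc hs
    split_ifs with h
    · exact hs
    · apply nodup_foldl_pres _ ?_ _ _ hs
      intro s2 k1 hs2
      apply nodup_foldl_pres _ ?_ _ _ hs2
      intro s3 k2 hs3
      split_ifs with h2
      · exact PySem.Set.nodup_add _ _ hs3
      · exact hs3
  · exact List.nodup_nil

theorem nodup_totalB (edges : List (String × String))
    (adj : PySem.Dict String (PySem.Set String)) : (totalB edges adj).Nodup := by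
  unfold totalB
  apply nodup_foldl_pres
  · intro s ab hs
    apply nodup_foldl_pres _ ?_ _ _ hs
    intro s2 w hs2
    split_ifs with h
    · exact PySem.Set.nodup_add _ _ hs2
    · exact hs2
  · exact List.nodup_nil

-- membership in the adjacency sets after one building step
theorem mem_getD_buildPair (d : PySem.Dict String (PySem.Set String)) (a b u v : String) :
    v ∈ ((d.modify a PySem.Set.empty (fun s => PySem.Set.add s b)).modify b PySem.Set.empty
        (fun s => PySem.Set.add s a)).getD u PySem.Set.empty ↔
      v ∈ d.getD u PySem.Set.empty ∨ (u = a ∧ v = b) ∨ (u = b ∧ v = a) := by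
  rw [PySem.Dict.getD_modify]
  by_cases hub : u = b
  · rw [if_pos hub, PySem.Set.mem_add, PySem.Dict.getD_modify]
    by_cases hba : b = a
    · rw [if_pos hba, PySem.Set.mem_add]
      subst hub; subst hba
      tauto
    · rw [if_neg hba]
      subst hub
      constructor
      · rintro (h | h) <;> tauto
      · rintro (h | ⟨h1, h2⟩ | ⟨h1, h2⟩)
        · tauto
        · exact absurd h1 hba
        · tauto
  · rw [if_neg hub, PySem.Dict.getD_modify]
    by_cases hua : u = a
    · rw [if_pos hua, PySem.Set.mem_add]
      subst hua
      constructor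
      · rintro (h | h) <;> tauto
      · rintro (h | ⟨h1, h2⟩ | ⟨h1, h2⟩)
        · tauto
        · tauto
        · exact absurd h1 hub
    · rw [if_neg hua]
      constructor
      · tauto
      · rintro (h | ⟨h1, h2⟩ | ⟨h1, h2⟩)
        · exact h
        · exact absurd h1 hua
        · exact absurd h1 hub

-- characterisation of adjacency: v is recorded as a neighbour of u iff some input line
-- is the edge u-v in either orientation
theorem mem_foldl_buildStep (u v : String) :
    ∀ (l : List String) (d : PySem.Dict String (PySem.Set String)),
      v ∈ (l.foldl buildStep d).getD u PySem.Set.empty ↔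
        v ∈ d.getD u PySem.Set.empty ∨ ∃ line ∈ l,
          PySem.Str.split? line "-" = some [u, v] ∨ PySem.Str.split? line "-" = some [v, u] := by
  intro l
  induction l with
  | nil => simp
  | cons line t ih =>
    intro d
    rw [List.foldl_cons, ih]
    have hstep : v ∈ (buildStep d line).getD u PySem.Set.empty ↔
        v ∈ d.getD u PySem.Set.empty ∨
          PySem.Str.split? line "-" = some [u, v] ∨ PySem.Str.split? line "-" = some [v, u] := by
      unfold buildStep
      rcases hs : PySem.Str.split? line "-" with _ | parts
      · simp
      · match parts with
        | [] => simp
        | [a] => simp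
        | a :: b :: c :: tl => simp
        | [a, b] =>
          rw [mem_getD_buildPair]
          simp only [Option.some.injEq, List.cons.injEq, and_true]
          constructor
          · rintro (h | ⟨h1, h2⟩ | ⟨h1, h2⟩) <;> subst_vars <;> tauto
          · rintro (h | ⟨h1, h2⟩ | ⟨h1, h2⟩) <;> subst_vars <;> tauto
    rw [hstep]
    simp only [List.mem_cons]
    constructor
    · rintro ((h | h) | ⟨line', hl, h⟩)
      · tauto
      · exact Or.inr ⟨line, Or.inl rfl, h⟩
      · exact Or.inr ⟨line', Or.inr hl, h⟩
    · rintro (h | ⟨line', hl | hl, h⟩)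
      · tauto
      · subst hl; tauto
      · exact Or.inr ⟨line', hl, h⟩

theorem mem_mkConn (data : List String) (u v : String) :
    v ∈ (mkConn data).getD u PySem.Set.empty ↔ ∃ line ∈ data,
      PySem.Str.split? line "-" = some [u, v] ∨ PySem.Str.split? line "-" = some [v, u] := by
  unfold mkConn
  rw [mem_foldl_buildStep]
  simp [PySem.Dict.getD_empty, PySem.Set.empty]

theorem nodup_keys_mkConn (data : List String) : (mkConn data).keys.Nodup := by
  unfold mkConn
  have hgen : ∀ (l : List String) (d : PySem.Dict String (PySem.Set String)),
      d.keys.Nodup → (l.foldl buildStep d).keys.Nodup := by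
    intro l
    induction l with
    | nil => intro d hd; exact hd
    | cons line t ih =>
      intro d hd
      rw [List.foldl_cons]
      apply ih
      unfold buildStep
      rcases hs : PySem.Str.split? line "-" with _ | parts
      · exact hd
      · match parts with
        | [] => exact hd
        | [a] => exact hd
        | a :: b :: c :: tl => exact hd
        | [a, b] =>
          rw [PySem.Dict.keys_modify]
          apply PySem.Dict.nodup_keys_insert
          rw [PySem.Dict.keys_modify]
          exact PySem.Dict.nodup_keys_insert _ _ _ hd
  refine hgen data _ ?_
  rw [PySem.Dict.keys_empty]
  exact List.nodup_nil

-- adjacency abbreviation used by the characterisations below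
def Adj (data : List String) (u v : String) : Prop :=
  v ∈ (mkConn data).getD u PySem.Set.empty

theorem adj_symm (data : List String) (u v : String) (h : Adj data u v) : Adj data v u := by
  unfold Adj at *
  rw [mem_mkConn] at *
  obtain ⟨line, hl, h⟩ := h
  refine ⟨line, hl, ?_⟩
  tauto

-- the items loop of A reaches exactly the keys with their stored neighbour sets
theorem A_char (data : List String) (x : List String) :
    x ∈ totalA (mkConn data) ↔ ∃ k k1 k2, PySem.Str.pyGet? k 0 = some 't' ∧
      Adj data k k1 ∧ Adj data k1 k2 ∧ Adj data k k2 ∧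
      x = PySem.List.sorted [k, k1, k2] (fun y => y) := by
  rw [mem_totalA]
  constructor
  · rintro ⟨kc, hkc, ht, k1, hk1, k2, hk2a, hk2c, hx⟩
    have hconn : (mkConn data).getD kc.1 PySem.Set.empty = kc.2 :=
      PySem.Dict.getD_of_mem_items _ hkc (nodup_keys_mkConn data) PySem.Set.empty
    refine ⟨kc.1, k1, k2, ht, ?_, hk2a, ?_, hx⟩
    · unfold Adj; rw [hconn]; exact hk1
    · unfold Adj; rw [hconn]; exact hk2c
  · rintro ⟨k, k1, k2, ht, h1, h12, h2, hx⟩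
    unfold Adj at h1 h12 h2
    rcases hg : (mkConn data).get? k with _ | s
    · rw [PySem.Dict.getD_eq_get?_getD, hg] at h1
      simp [PySem.Set.empty] at h1
    · have hgd : (mkConn data).getD k PySem.Set.empty = s := by
        rw [PySem.Dict.getD_eq_get?_getD, hg]; rfl
      refine ⟨(k, s), PySem.Dict.mem_items_of_get?_eq_some _ hg, ht, k1, ?_, k2, h12, ?_, hx⟩
      · rw [← hgd]; exact h1
      · rw [← hgd]; exact h2

-- B's edge list holds exactly the oriented pairs of the admitted lines
theorem fst_foldl_buildStepB (ab : String × String) :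
    ∀ (l : List String) (st : List (String × String) × PySem.Dict String (PySem.Set String)),
      ab ∈ (l.foldl buildStepB st).1 ↔ ab ∈ st.1 ∨ ∃ line ∈ l,
        PySem.Str.split? line "-" = some [ab.1, ab.2] := by
  intro l
  induction l with
  | nil => simp
  | cons line t ih =>
    intro st
    rw [List.foldl_cons, ih]
    have hstep : ab ∈ (buildStepB st line).1 ↔
        ab ∈ st.1 ∨ PySem.Str.split? line "-" = some [ab.1, ab.2] := by
      unfold buildStepB
      rcases hs : PySem.Str.split? line "-" with _ | parts
      · simp
      · match parts with
        | [] => simp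
        | [a] => simp
        | a :: b :: c :: tl => simp
        | [a, b] =>
          simp only [List.mem_append, List.mem_singleton, Option.some.injEq,
            List.cons.injEq, and_true]
          constructor
          · rintro (h | h)
            · tauto
            · subst h; tauto
          · rintro (h | ⟨h1, h2⟩)
            · tauto
            · right
              rcases ab with ⟨p, q⟩
              simp_all
    rw [hstep]
    simp only [List.mem_cons]
    constructor
    · rintro ((h | h) | ⟨line', hl, h⟩)
      · tauto
      · exact Or.inr ⟨line, Or.inl rfl, h⟩
      · exact Or.inr ⟨line', Or.inr hl, h⟩
    · rintro (h | ⟨line', hl | hl, h⟩)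
      · tauto
      · subst hl; tauto
      · exact Or.inr ⟨line', hl, h⟩

theorem snd_foldl_buildStepB :
    ∀ (l : List String) (st : List (String × String) × PySem.Dict String (PySem.Set String)),
      (l.foldl buildStepB st).2 = l.foldl buildStep st.2 := by
  intro l
  induction l with
  | nil => intro st; rfl
  | cons line t ih =>
    intro st
    rw [List.foldl_cons, List.foldl_cons, ih]
    congr 1
    unfold buildStepB buildStep
    rcases hs : PySem.Str.split? line "-" with _ | parts
    · rfl
    · match parts with
      | [] => rfl
      | [a] => rfl
      | a :: b :: c :: tl => rfl
      | [a, b] => rfl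

-- Python's k[0] == 't' and k.startswith("t") agree on every key
theorem tcond (k : String) :
    PySem.Str.startswith k "t" = true ↔ PySem.Str.pyGet? k 0 = some 't' := by
  have h0 : PySem.Str.pyGet? k 0 = k.toList[0]? := by
    simpa using PySem.Str.pyGet?_natCast k 0
  rw [h0, PySem.Str.startswith_eq, PySem.Chars.startswith_iff,
    show "t".toList = ['t'] from rfl]
  rcases hl : k.toList with _ | ⟨c, t⟩
  · simp
  · simp [List.cons_prefix_cons]
    exact eq_comm

theorem sorted_triple_perm (u v w u' v' w' : String)
    (h : List.Perm [u, v, w] [u', v', w']) :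
    PySem.List.sorted [u, v, w] (fun y => y) = PySem.List.sorted [u', v', w'] (fun y => y) :=
  PySem.List.sorted_eq_sorted_of_perm _ _ _ Function.injective_id h

-- B's characterisation in terms of Adj and the oriented edge list
theorem B_char (data : List String) (x : List String) :
    x ∈ totalB (data.foldl buildStepB ([], PySem.Dict.empty)).1
        (data.foldl buildStepB ([], PySem.Dict.empty)).2 ↔
      ∃ a b, (∃ line ∈ data, PySem.Str.split? line "-" = some [a, b]) ∧
        ∃ w, Adj data a w ∧ Adj data b w ∧
          (PySem.Str.startswith a "t" = true ∨ PySem.Str.startswith b "t" = true ∨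
            PySem.Str.startswith w "t" = true) ∧
          x = PySem.List.sorted [a, b, w] (fun y => y) := by
  rw [mem_totalB]
  have hsnd : (data.foldl buildStepB ([], PySem.Dict.empty)).2 = mkConn data :=
    snd_foldl_buildStepB data _
  constructor
  · rintro ⟨ab, hab, w, hw1, hw2, hcond, hx⟩
    rw [fst_foldl_buildStepB] at hab
    rcases hab with h | h
    · exact absurd h (List.not_mem_nil)
    · rw [hsnd] at hw1 hw2
      exact ⟨ab.1, ab.2, h, w, hw1, hw2, hcond, hx⟩
  · rintro ⟨a, b, hedge, w, hw1, hw2, hcond, hx⟩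
    refine ⟨(a, b), ?_, w, ?_, ?_, hcond, hx⟩
    · rw [fst_foldl_buildStepB]; exact Or.inr hedge
    · rw [hsnd]; exact hw1
    · rw [hsnd]; exact hw2

-- the two collected sets have the same members
theorem totals_mem_eq (data : List String) (x : List String) :
    x ∈ totalA (mkConn data) ↔
      x ∈ totalB (data.foldl buildStepB ([], PySem.Dict.empty)).1
        (data.foldl buildStepB ([], PySem.Dict.empty)).2 := by
  rw [A_char, B_char]
  constructor
  · rintro ⟨k, k1, k2, ht, h1, h12, h2, hx⟩
    have ht' : PySem.Str.startswith k "t" = true := (tcond k).2 ht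
    have h1' := h1
    unfold Adj at h1'
    rw [mem_mkConn] at h1'
    obtain ⟨line, hl, hor | hor⟩ := h1'
    · -- oriented edge (k, k1): close with w = k2
      exact ⟨k, k1, ⟨line, hl, hor⟩, k2, h2, h12, Or.inl ht', hx⟩
    · -- oriented edge (k1, k): close with w = k2
      refine ⟨k1, k, ⟨line, hl, hor⟩, k2, h12, h2, Or.inr (Or.inl ht'), ?_⟩
      rw [hx]
      exact sorted_triple_perm _ _ _ _ _ _ (List.Perm.swap k1 k [k2])
  · rintro ⟨a, b, ⟨line, hl, hsplit⟩, w, hw1, hw2, hcond, hx⟩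
    have hab : Adj data a b := by
      unfold Adj; rw [mem_mkConn]; exact ⟨line, hl, Or.inl hsplit⟩
    rcases hcond with ht | ht | ht
    · exact ⟨a, b, w, (tcond a).1 ht, hab, hw2, hw1, hx⟩
    · refine ⟨b, a, w, (tcond b).1 ht, adj_symm data a b hab, hw1, hw2, ?_⟩
      rw [hx]
      exact sorted_triple_perm _ _ _ _ _ _ (List.Perm.swap b a [w])
    · refine ⟨w, a, b, (tcond w).1 ht, adj_symm data a w hw1, hab, adj_symm data b w hw2, ?_⟩
      rw [hx]
      exact sorted_triple_perm _ _ _ _ _ _ (List.perm_append_singleton w [a, b])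

-- ===== VERDICT (by name: the statement is the Claim_ definition above) =====
theorem part1_spec : Claim_equal_part1 := by
  intro data _ _
  unfold Spec_part1 part1 part1_alt
  have hperm : (totalA (mkConn data)).Perm
      (totalB (data.foldl buildStepB ([], PySem.Dict.empty)).1
        (data.foldl buildStepB ([], PySem.Dict.empty)).2) :=
    (List.perm_ext_iff_of_nodup (nodup_totalA _) (nodup_totalB _ _)).2
      (totals_mem_eq data)
  simp [PySem.Set.len, hperm.length_eq]
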